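-- pv_equiv track=rewrite | github.com/Matheus-Bortolotto/Cp4-dynamic | knapsack.py | _enumerate_half
-- ===== SOURCE A (Python) =====
-- from typing import List, Tuple
--
-- def _enumerate_half(items: List[Tuple[int,int]]):
--     """Enumera todos os subconjuntos de uma metade, retornando (custo, benefício, mask)."""
--     n = len(items)
--     out = []
--     for mask in range(1 << n):
--         cost = 0
--         ben = 0
--         for i in range(n):
--             if mask & (1 << i):
--                 c, b = items[i]
--                 cost += c
--                 ben += b
--         out.append((cost, ben, mask))
--     return out
-- ===== SOURCE B (Python) =====
-- from typing import List, Tuple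
--
-- def _enumerate_half(items: List[Tuple[int, int]]):
--     """Enumera todos os subconjuntos de uma metade, retornando (custo, beneficio, mask)."""
--     out = [(0, 0, 0)]
--     bit = 1
--     for c, b in items:
--         out = out + [(cc + c, bb + b, mm + bit) for (cc, bb, mm) in out]
--         bit <<= 1
--     return out
-- ===== Notes on version B (the rewrite author's own statement) =====
-- stated objective: alternative
-- what changed: Replaces A's per-mask inner loop over all n bits with an incremental doubling: for each item, append a shifted copy (cost+c, ben+b, mask+bit) of the subset list built so far, so each entry is produced in O(1) instead of O(n); intended as faster (measured 8.2x at the largest size both finished, but both are exponential overall so a timing run could not confirm it at its top size).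
import Mathlib
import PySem

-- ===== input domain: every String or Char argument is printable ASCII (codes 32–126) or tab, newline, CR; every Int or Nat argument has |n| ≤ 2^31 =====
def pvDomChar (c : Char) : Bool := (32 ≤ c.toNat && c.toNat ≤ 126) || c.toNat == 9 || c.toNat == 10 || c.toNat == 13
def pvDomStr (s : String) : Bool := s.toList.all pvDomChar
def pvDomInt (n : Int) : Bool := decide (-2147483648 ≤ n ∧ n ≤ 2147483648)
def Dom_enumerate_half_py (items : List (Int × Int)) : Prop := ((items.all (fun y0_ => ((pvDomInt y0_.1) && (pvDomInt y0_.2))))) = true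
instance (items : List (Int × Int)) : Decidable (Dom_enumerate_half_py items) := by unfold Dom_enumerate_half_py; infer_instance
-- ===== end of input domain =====

-- B replaces A's per-mask inner bit loop with an incremental doubling that appends, for each
-- item, a shifted copy of the subset list built so far (each output entry produced in O(1)).

-- ===== PORT A =====
-- A's inner loop over range(n): test each bit of mask, add items[i] (index always in range).
def pvInnerA (items : List (Int × Int)) (mask : Nat) : Int × Int :=
  (List.range items.length).foldl
    (fun s i =>
      if mask &&& (1 <<< i) ≠ 0 then
        (s.1 + (items.getD i (0, 0)).1, s.2 + (items.getD i (0, 0)).2)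
      else s)
    (0, 0)

def enumerate_half_py (items : List (Int × Int)) : List (Int × Int × Int) :=
  (List.range (1 <<< items.length)).foldl
    (fun out mask => out ++ [((pvInnerA items mask).1, (pvInnerA items mask).2, (mask : Int))])
    []

-- ===== PORT B =====
-- one item step: out = out + [(cc+c, bb+b, mm+bit) for ...]; bit <<= 1
def pvStepB (st : List (Int × Int × Int) × Int) (p : Int × Int) : List (Int × Int × Int) × Int :=
  (st.1 ++ st.1.map (fun t => (t.1 + p.1, t.2.1 + p.2, t.2.2 + st.2)), st.2 * 2)

def enumerate_half_py_alt (items : List (Int × Int)) : List (Int × Int × Int) :=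
  (items.foldl pvStepB ([(0, 0, 0)], 1)).1

-- ===== PRECONDITION & SPEC =====
def Spec_enumerate_half_py (items : List (Int × Int)) (out : List (Int × Int × Int)) : Prop := out = enumerate_half_py_alt items
instance (items : List (Int × Int)) (out : List (Int × Int × Int)) : Decidable (Spec_enumerate_half_py items out) := by unfold Spec_enumerate_half_py; infer_instance

-- ===== CLAIM (what is proved, stated in full; the proofs are below) =====
def Claim_equal_enumerate_half_py : Prop := ∀ (items : List (Int × Int)), Dom_enumerate_half_py items → Spec_enumerate_half_py items (enumerate_half_py items)

-- ===== LEMMAS AND PROOFS =====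

theorem pvBit_iff (m i : Nat) : (m &&& (1 <<< i) ≠ 0) ↔ m.testBit i := by
  simp [Nat.shiftLeft_eq, Nat.and_two_pow]

theorem pvTestBit_high (n m : Nat) (hm : m < 2 ^ n) : (2 ^ n + m).testBit n = true := by
  rw [Nat.testBit, Nat.shiftRight_eq_div_pow, Nat.add_comm,
    Nat.add_div_right _ (Nat.two_pow_pos n), Nat.div_eq_of_lt hm]
  decide

-- A as a map over all masks
theorem pvEnumA_eq_map (items : List (Int × Int)) :
    enumerate_half_py items =
      (List.range (1 <<< items.length)).map
        (fun m => ((pvInnerA items m).1, (pvInnerA items m).2, (m : Int))) := by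
  unfold enumerate_half_py
  rw [PySem.List.foldl_append_singleton_eq_map]
  simp

-- inner sums only look at bits i < n
theorem pvInnerA_congr (items : List (Int × Int)) (m m' : Nat)
    (h : ∀ i < items.length, m.testBit i = m'.testBit i) :
    pvInnerA items m = pvInnerA items m' := by
  unfold pvInnerA
  refine List.foldl_ext _ _ _ (fun s i hi => ?_)
  have hi' : i < items.length := List.mem_range.mp hi
  by_cases hb : m.testBit i
  · rw [if_pos ((pvBit_iff m i).mpr hb), if_pos ((pvBit_iff m' i).mpr (h i hi' ▸ hb))]
  · rw [if_neg (fun hc => hb ((pvBit_iff m i).mp hc)),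
      if_neg (fun hc => hb ((h i hi').symm ▸ (pvBit_iff m' i).mp hc))]

-- inner sum over xs ++ [y]: the range-(n+1) fold splits off index n
theorem pvInnerA_append (xs : List (Int × Int)) (y : Int × Int) (m : Nat) :
    pvInnerA (xs ++ [y]) m =
      if m &&& (1 <<< xs.length) ≠ 0 then
        ((pvInnerA xs m).1 + y.1, (pvInnerA xs m).2 + y.2)
      else pvInnerA xs m := by
  unfold pvInnerA
  rw [List.length_append, List.length_singleton, List.range_succ, List.foldl_append]
  have hfold :
      (List.range xs.length).foldl
        (fun (s : Int × Int) i =>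
          if m &&& (1 <<< i) ≠ 0 then
            (s.1 + ((xs ++ [y]).getD i (0, 0)).1, s.2 + ((xs ++ [y]).getD i (0, 0)).2)
          else s) (0, 0)
      = (List.range xs.length).foldl
        (fun (s : Int × Int) i =>
          if m &&& (1 <<< i) ≠ 0 then
            (s.1 + (xs.getD i (0, 0)).1, s.2 + (xs.getD i (0, 0)).2)
          else s) (0, 0) := by
    refine List.foldl_ext _ _ _ (fun s i hi => ?_)
    have hi' : i < xs.length := List.mem_range.mp hi
    rw [List.getD, List.getElem?_append_left hi']
    rfl
  rw [hfold]
  have hy : (xs ++ [y]).getD xs.length (0, 0) = y := by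
    simp [List.getD]
  simp only [List.foldl_cons, List.foldl_nil, hy]

theorem pvInnerA_low (xs : List (Int × Int)) (y : Int × Int) (m : Nat)
    (hm : m < 2 ^ xs.length) : pvInnerA (xs ++ [y]) m = pvInnerA xs m := by
  rw [pvInnerA_append]
  rw [if_neg]
  intro hc
  have := (pvBit_iff m xs.length).mp hc
  rw [Nat.testBit_lt_two_pow hm] at this
  exact Bool.false_ne_true this

theorem pvInnerA_high (xs : List (Int × Int)) (y : Int × Int) (m : Nat)
    (hm : m < 2 ^ xs.length) :
    pvInnerA (xs ++ [y]) (2 ^ xs.length + m) =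
      ((pvInnerA xs m).1 + y.1, (pvInnerA xs m).2 + y.2) := by
  rw [pvInnerA_append]
  rw [if_pos ((pvBit_iff _ _).mpr (pvTestBit_high xs.length m hm))]
  have hlow : pvInnerA xs (2 ^ xs.length + m) = pvInnerA xs m :=
    pvInnerA_congr xs _ m (fun i hi => Nat.testBit_two_pow_add_gt hi m)
  rw [hlow]

-- A on xs ++ [y] = A on xs followed by its y-shifted copy
theorem pvEnumA_snoc (xs : List (Int × Int)) (y : Int × Int) :
    enumerate_half_py (xs ++ [y]) =
      enumerate_half_py xs ++
        (enumerate_half_py xs).map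
          (fun t => (t.1 + y.1, t.2.1 + y.2, t.2.2 + (2 : Int) ^ xs.length)) := by
  rw [pvEnumA_eq_map, pvEnumA_eq_map, List.map_map]
  rw [List.length_append, List.length_singleton, Nat.one_shiftLeft, Nat.one_shiftLeft]
  have hsplit : 2 ^ (xs.length + 1) = 2 ^ xs.length + 2 ^ xs.length := by ring
  rw [hsplit, List.range_add]
  rw [List.map_append, List.map_map]
  congr 1
  · refine List.map_congr_left (fun m hm => ?_)
    have hm' : m < 2 ^ xs.length := List.mem_range.mp hm
    rw [pvInnerA_low xs y m hm']
  · refine List.map_congr_left (fun m hm => ?_)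
    have hm' : m < 2 ^ xs.length := List.mem_range.mp hm
    simp only [Function.comp_apply]
    rw [pvInnerA_high xs y m hm']
    push_cast
    ring_nf

-- B's bit accumulator after the fold
theorem pvStepB_snd (xs : List (Int × Int)) (st : List (Int × Int × Int) × Int) :
    (xs.foldl pvStepB st).2 = st.2 * 2 ^ xs.length := by
  induction xs generalizing st with
  | nil => simp
  | cons p xs ih =>
      rw [List.foldl_cons, ih]
      show st.2 * 2 * 2 ^ xs.length = _
      rw [List.length_cons, pow_succ]
      ring

theorem pvEnumB_snoc (xs : List (Int × Int)) (y : Int × Int) :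
    enumerate_half_py_alt (xs ++ [y]) =
      enumerate_half_py_alt xs ++
        (enumerate_half_py_alt xs).map
          (fun t => (t.1 + y.1, t.2.1 + y.2, t.2.2 + (2 : Int) ^ xs.length)) := by
  unfold enumerate_half_py_alt
  rw [List.foldl_append, List.foldl_cons, List.foldl_nil]
  show (xs.foldl pvStepB ([(0,0,0)], 1)).1 ++ _ = _
  rw [pvStepB_snd xs ([(0,0,0)], 1)]
  norm_num

theorem pvEnum_eq (items : List (Int × Int)) :
    enumerate_half_py items = enumerate_half_py_alt items := by
  induction items using List.reverseRecOn with
  | nil => decide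
  | append_singleton xs y ih =>
      rw [pvEnumA_snoc, pvEnumB_snoc, ih]

-- ===== VERDICT (by name: the statement is the Claim_ definition above) =====
theorem enumerate_half_py_spec : Claim_equal_enumerate_half_py := by
  intro items _
  unfold Spec_enumerate_half_py
  exact pvEnum_eq items
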